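-- pv_equiv track=rewrite | github.com/morefinances/python-exercises | excel_read_result.py | my_txt
-- ===== SOURCE A (Python) =====
-- def my_txt(text):
--     txt = ""
--     for i in range(len(text)):
--         if text[i] == "/":
--             break
--         if text[i] == '"':
--             txt += ""
--         else:
--             txt += text[i]
--     return txt
-- ===== SOURCE B (Python) =====
-- def my_txt(text):
--     # Whole-string operations: cut at the first slash (found via find, with a
--     # guard since find returns -1 when absent), then drop every double-quote.
--     i = text.find("/")
--     head = text if i < 0 else text[:i]
--     return "".join(c for c in head if c != '"')
-- ===== Notes on version B (the rewrite author's own statement) =====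
-- stated objective: faster
-- what changed: Replaces A's per-character index loop (break at the first slash, grow a string by repeated concatenation, skip double-quotes) with whole-string operations: find the first slash, slice the prefix, and drop double-quotes via a filtered join; the explicit loop and accumulator disappear.
import Mathlib
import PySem

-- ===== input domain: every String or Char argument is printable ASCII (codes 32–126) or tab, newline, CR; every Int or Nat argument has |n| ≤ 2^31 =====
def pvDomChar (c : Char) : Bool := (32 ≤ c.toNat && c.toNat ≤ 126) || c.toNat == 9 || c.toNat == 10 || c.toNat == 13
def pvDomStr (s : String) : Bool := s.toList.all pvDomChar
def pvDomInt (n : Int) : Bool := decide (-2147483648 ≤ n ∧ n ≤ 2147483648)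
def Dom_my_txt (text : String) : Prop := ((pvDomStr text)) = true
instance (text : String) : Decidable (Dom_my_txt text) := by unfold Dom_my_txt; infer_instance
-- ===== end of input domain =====

-- B replaces A's index loop (break at the first slash, grow an accumulator,
-- skip double-quotes) by whole-string operations: find the first slash, slice
-- the prefix, drop double-quotes via a filtered join.


-- ===== PORT A =====
-- A's loop over the characters: break at a slash, append the empty string for
-- a double-quote, append the character otherwise, carrying the accumulator txt
-- (strings as char lists).
def myTxtGoA : List Char → List Char → List Char
  | [], txt => txt
  | c :: rest, txt =>
    if c = '/' then txt
    else if c = '"' then myTxtGoA rest (txt ++ [])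
    else myTxtGoA rest (txt ++ [c])

def my_txt (text : String) : String := String.ofList (myTxtGoA text.toList [])

-- ===== PORT B =====
-- B: find the slash, slice the prefix (whole string when absent), join the
-- non-double-quote characters (the genexp filter is List.filter).
def my_txt_alt (text : String) : String :=
  let i := PySem.Str.find text "/"
  let head := if i < 0 then text else PySem.Str.slice text none (some i)
  String.ofList (head.toList.filter (fun c => c != '"'))

-- ===== PRECONDITION & SPEC =====
def Spec_my_txt (text : String) (out : String) : Prop := out = my_txt_alt text
instance (text : String) (out : String) : Decidable (Spec_my_txt text out) := by unfold Spec_my_txt; infer_instance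

-- ===== CLAIM (what is proved, stated in full; the proofs are below) =====
def Claim_equal_my_txt : Prop := ∀ (text : String), Dom_my_txt text → Spec_my_txt text (my_txt text)

-- ===== LEMMAS AND PROOFS =====

-- A's loop computes: the double-quote-free part of the prefix before the first slash.
theorem myTxtGoA_eq (cs : List Char) :
    ∀ txt : List Char,
      myTxtGoA cs txt = txt ++ (cs.takeWhile (fun c => c != '/')).filter (fun c => c != '"') := by
  induction cs with
  | nil => intro txt; simp [myTxtGoA]
  | cons c rest ih =>
    intro txt
    by_cases h1 : c = '/'
    · simp [myTxtGoA, h1]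
    · by_cases h2 : c = '"'
      · simp [myTxtGoA, h2, ih]
      · simp [myTxtGoA, h1, h2, ih (txt ++ [c])]

theorem singleton_prefix_head? {a : Char} {l : List Char} :
    [a] <+: l ↔ l.head? = some a := by
  constructor
  · rintro ⟨t, rfl⟩; rfl
  · intro h
    cases l with
    | nil => simp at h
    | cons b t => simp at h; exact ⟨t, by simp [h]⟩

theorem take_eq_takeWhile (cs : List Char) :
    ∀ k : Nat, (∀ i, i < k → cs[i]? ≠ some '/') → cs[k]? = some '/' →
      cs.takeWhile (fun c => c != '/') = cs.take k := by
  induction cs with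
  | nil => intro k _ hk; simp at hk
  | cons c rest ih =>
    intro k hlt hk
    cases k with
    | zero =>
      simp at hk
      simp [hk]
    | succ j =>
      have hc : c ≠ '/' := by
        have := hlt 0 (Nat.succ_pos j); simpa using this
      have htail : ∀ i, i < j → rest[i]? ≠ some '/' := by
        intro i hi
        have := hlt (i + 1) (by omega); simpa using this
      have hkj : rest[j]? = some '/' := by simpa using hk
      simp [hc, List.take_succ_cons, ih j htail hkj]

-- ===== VERDICT (by name: the statement is the Claim_ definition above) =====
theorem my_txt_spec : Claim_equal_my_txt := by
  intro text _
  unfold Spec_my_txt my_txt my_txt_alt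
  rw [myTxtGoA_eq, List.nil_append]
  have hbr : PySem.Str.find text "/" = PySem.Chars.find text.toList ['/'] := by
    simp [PySem.Str.find_eq]
  rw [hbr] at *
  by_cases hneg : PySem.Chars.find text.toList ['/'] < 0
  · -- no slash: find = -1, the char is absent, takeWhile keeps everything
    have h1 : PySem.Chars.find text.toList ['/'] = -1 := by
      have := PySem.Chars.neg_one_le_find text.toList ['/']
      omega
    have hnin : ¬ ['/'] <:+: text.toList := (PySem.Chars.find_eq_neg_one_iff _ _).mp h1
    have hmem : '/' ∉ text.toList := by
      intro hm
      obtain ⟨l1, l2, hsplit⟩ := List.append_of_mem hm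
      exact hnin ⟨l1, l2, by simp [hsplit]⟩
    have htw : text.toList.takeWhile (fun c => c != '/') = text.toList := by
      rw [List.takeWhile_eq_self_iff]
      intro a ha
      simp only [bne_iff_ne, ne_eq]
      intro h; exact hmem (h ▸ ha)
    simp [hneg, htw]
  · -- slash present; find points at the first occurrence
    have hnn : 0 ≤ PySem.Chars.find text.toList ['/'] := by omega
    obtain ⟨hpre, hmin⟩ := PySem.Chars.find_spec hnn
    have hk : text.toList[(PySem.Chars.find text.toList ['/']).toNat]? = some '/' := by
      have := singleton_prefix_head?.mp hpre
      rwa [List.head?_drop] at this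
    have hlt : ∀ i, i < (PySem.Chars.find text.toList ['/']).toNat →
        text.toList[i]? ≠ some '/' := by
      intro i hi hsome
      exact hmin i hi (singleton_prefix_head?.mpr (by rwa [List.head?_drop]))
    have htw := take_eq_takeWhile text.toList _ hlt hk
    have hslice : (PySem.Str.slice text none (some (PySem.Chars.find text.toList ['/']))).toList
        = text.toList.take (PySem.Chars.find text.toList ['/']).toNat := by
      simp [PySem.Str.toList_slice, PySem.Chars.slice_eq_listSlice,
        PySem.List.slice_to _ hnn]
    simp [hneg, htw, hslice]
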